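-- pv_equiv track=rewrite | github.com/Jane11111/Leetcode2021 | 030_1.py | check
-- ===== SOURCE A (Python) =====
-- def check(s,idx,words):
--
--     dic = {word:0 for word in words}
--     for word in words:
--         dic[word] += 1
--
--     n = len(words)
--     k = len(words[0])
--
--     for i in range(idx,idx+n*k,k):
--         if s[i:i+k] not in dic or dic[s[i:i+k]] <=0:
--             return False
--         dic[s[i:i+k]] -=1
--     return True
-- ===== SOURCE B (Python) =====
-- def check(s, idx, words):
--     n = len(words)
--     k = len(words[0])
--     chunks = [s[idx + j * k: idx + (j + 1) * k] for j in range(n)]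
--     return sorted(chunks) == sorted(words)
-- ===== Notes on version B (the rewrite author's own statement) =====
-- stated objective: simpler
-- what changed: B extracts the n chunks in one comprehension and compares the two multisets via sorted(chunks) == sorted(words), instead of A's dict-building pass followed by a decrement-and-early-exit scan.
import Mathlib
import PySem

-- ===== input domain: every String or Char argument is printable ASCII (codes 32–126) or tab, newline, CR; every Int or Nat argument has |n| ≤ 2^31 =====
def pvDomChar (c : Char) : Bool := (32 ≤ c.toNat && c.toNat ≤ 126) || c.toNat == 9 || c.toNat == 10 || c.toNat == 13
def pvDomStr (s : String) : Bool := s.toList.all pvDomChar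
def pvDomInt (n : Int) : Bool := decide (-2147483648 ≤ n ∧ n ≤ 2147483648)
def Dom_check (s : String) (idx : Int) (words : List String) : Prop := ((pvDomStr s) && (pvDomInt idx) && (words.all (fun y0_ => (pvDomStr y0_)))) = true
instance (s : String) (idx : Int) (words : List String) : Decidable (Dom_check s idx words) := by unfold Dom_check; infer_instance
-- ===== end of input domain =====

-- B replaces A's dict-decrement scan by building the n chunks and comparing the two sorted lists (multiset equality); same return value on Pre_.

-- ===== PORT A =====
-- the for-loop over range(idx, idx+n*k, k): early-exit decrement scan over the dict
def checkA_loop (s : String) (k : Int) : List Int → PySem.Dict String Int → Bool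
  | [], _ => true
  | i :: rest, dic =>
    let c := PySem.Str.slice s (some i) (some (i + k))
    if !(dic.contains c) || dic.getD c 0 ≤ 0 then false
    else checkA_loop s k rest (dic.insert c (dic.getD c 0 - 1))

def check (s : String) (idx : Int) (words : List String) : Bool :=
  let dic0 := words.foldl (fun d w => d.insert w (0 : Int)) PySem.Dict.empty
  let dic := words.foldl (fun d w => d.modify w 0 (· + 1)) dic0
  let n : Int := words.length
  match words with
  | [] => false   -- Python: words[0] raises IndexError here (excluded by Pre_check)
  | w0 :: _ =>
    let k := PySem.Str.len w0
    checkA_loop s k (PySem.List.pyRange idx (idx + n * k) k) dic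

-- ===== PORT B =====
def check_alt (s : String) (idx : Int) (words : List String) : Bool :=
  match words with
  | [] => false   -- Python: words[0] raises IndexError here (excluded by Pre_check)
  | w0 :: _ =>
    let k := PySem.Str.len w0
    let chunks := (List.range words.length).map
      (fun (j : Nat) => PySem.Str.slice s (some (idx + (j : Int) * k)) (some (idx + ((j : Int) + 1) * k)))
    PySem.List.sorted chunks (fun x => x) == PySem.List.sorted words (fun x => x)

-- ===== PRECONDITION & SPEC =====
-- Pre_ excludes exactly the inputs where A raises: empty words (IndexError on words[0])
-- and a nonempty words with empty first word (ValueError: range() step n*k has k = 0).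
def Pre_check (_s : String) (_idx : Int) (words : List String) : Prop :=
  words ≠ [] ∧ words.headD "" ≠ ""
instance (s : String) (idx : Int) (words : List String) : Decidable (Pre_check s idx words) := by
  unfold Pre_check; infer_instance
def pvWitness_check : String × Int × List String := ("barfoothefoobar", 3, ["foo", "the"])

def Spec_check (s : String) (idx : Int) (words : List String) (out : Bool) : Prop := out = check_alt s idx words
instance (s : String) (idx : Int) (words : List String) (out : Bool) : Decidable (Spec_check s idx words out) := by unfold Spec_check; infer_instance

-- ===== CLAIM (what is proved, stated in full; the proofs are below) =====
def Claim_equal_check : Prop := ∀ (s : String) (idx : Int) (words : List String), Dom_check s idx words → Pre_check s idx words → Spec_check s idx words (check s idx words)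

-- ===== LEMMAS AND PROOFS =====

-- a dict not containing a key yields the default
lemma getD_of_not_contains (d : PySem.Dict String Int) (c : String) (h : d.contains c = false) :
    d.getD c 0 = 0 := by
  simp [PySem.Dict.getD, (PySem.Dict.get?_eq_none_iff_contains d c).2 h]

-- the comprehension {word: 0 for word in words} maps everything to 0
lemma getD_zero_fold (ws : List String) (d : PySem.Dict String Int) (v : String)
    (h : d.getD v 0 = 0) :
    (ws.foldl (fun d w => d.insert w (0 : Int)) d).getD v 0 = 0 := by
  induction ws generalizing d with
  | nil => exact h
  | cons w ws ih =>
    refine ih _ ?_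
    by_cases hv : v = w
    · subst hv; exact PySem.Dict.getD_insert_self d v 0 0
    · rw [PySem.Dict.getD_insert_of_ne d 0 0 hv]; exact h

-- the counting rep of A's dict: getD w 0 = multiplicity of w in words
lemma rep_init (ws : List String) (w : String) :
    ((ws.foldl (fun d x => d.modify x 0 (· + 1))
        (ws.foldl (fun d x => d.insert x (0 : Int)) PySem.Dict.empty)).getD w 0)
      = ((Multiset.ofList ws).count w : Int) := by
  rw [PySem.Dict.getD_foldl_modify_add_one]
  rw [getD_zero_fold ws PySem.Dict.empty w (by
    simp [PySem.Dict.getD, PySem.Dict.empty, PySem.Dict.get?])]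
  simp

-- A's scan accepts exactly when the chunks form a sub-multiset of the dict's counts
lemma checkA_loop_iff (s : String) (k : Int) :
    ∀ (is : List Int) (dic : PySem.Dict String Int) (m : Multiset String),
      (∀ w, dic.getD w 0 = (m.count w : Int)) →
      (checkA_loop s k is dic = true ↔
        Multiset.ofList (is.map (fun i => PySem.Str.slice s (some i) (some (i + k)))) ≤ m) := by
  intro is
  induction is with
  | nil => intro dic m _; simp [checkA_loop]
  | cons i rest ih =>
    intro dic m hrep
    set c := PySem.Str.slice s (some i) (some (i + k)) with hc
    by_cases hcnt : m.count c = 0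
    · have hd : dic.getD c 0 = 0 := by rw [hrep c, hcnt]; rfl
      have hcond : (!(dic.contains c) || decide (dic.getD c 0 ≤ 0)) = true := by
        cases h : dic.contains c
        · simp
        · simp [hd]
      constructor
      · intro h
        exfalso
        simp only [checkA_loop, ← hc] at h
        rw [if_pos] at h
        · exact Bool.false_ne_true h
        · simpa using hcond
      · intro h
        exfalso
        have h1 : (Multiset.ofList ((i :: rest).map (fun i => PySem.Str.slice s (some i) (some (i + k))))).count c ≤ m.count c :=
          Multiset.le_iff_count.mp h c
        simp [List.map_cons, ← Multiset.cons_coe, ← hc, hcnt] at h1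
    · -- count c > 0 : A decrements and recurses
      have hpos : 0 < (m.count c : Int) := by exact_mod_cast Nat.pos_of_ne_zero hcnt
      have hd : dic.getD c 0 = (m.count c : Int) := hrep c
      have hcont : dic.contains c = true := by
        by_contra h
        have := getD_of_not_contains dic c (by simpa using h)
        omega
      have hcond : (!(dic.contains c) || decide (dic.getD c 0 ≤ 0)) = false := by
        simp [hcont]; omega
      have hstep : checkA_loop s k (i :: rest) dic
          = checkA_loop s k rest (dic.insert c (dic.getD c 0 - 1)) := by
        simp only [checkA_loop, ← hc]
        rw [if_neg]
        simp only [hcond]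
        exact Bool.false_ne_true
      have hrep' : ∀ w, (dic.insert c (dic.getD c 0 - 1)).getD w 0 = ((m.erase c).count w : Int) := by
        intro w
        by_cases hw : w = c
        · subst hw
          rw [PySem.Dict.getD_insert_self, hd, Multiset.count_erase_self]
          have : 1 ≤ m.count c := Nat.pos_of_ne_zero hcnt
          omega
        · rw [PySem.Dict.getD_insert_of_ne _ _ _ hw, hrep w,
            Multiset.count_erase_of_ne hw]
      rw [hstep, ih _ (m.erase c) hrep']
      -- rest ≤ m.erase c ↔ c ::ₘ rest ≤ m  (c ∈ m)
      constructor
      · intro h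
        rw [Multiset.le_iff_count]
        intro a
        have ha := Multiset.le_iff_count.mp h a
        by_cases hac : a = c
        · subst hac
          rw [Multiset.count_erase_self] at ha
          simp only [List.map_cons, ← Multiset.cons_coe, ← hc, Multiset.count_cons_self]
          have h1 : 1 ≤ m.count c := Nat.pos_of_ne_zero hcnt
          omega
        · rw [Multiset.count_erase_of_ne hac] at ha
          simp only [List.map_cons, ← Multiset.cons_coe, ← hc,
            Multiset.count_cons_of_ne hac]
          omega
      · intro h
        rw [Multiset.le_iff_count]
        intro a
        have ha := Multiset.le_iff_count.mp h a
        simp only [List.map_cons, ← Multiset.cons_coe, ← hc] at ha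
        by_cases hac : a = c
        · subst hac
          rw [Multiset.count_erase_self]
          rw [Multiset.count_cons_self] at ha
          omega
        · rw [Multiset.count_erase_of_ne hac]
          rw [Multiset.count_cons_of_ne hac] at ha
          omega

-- range(idx, idx + n*k, k) with k > 0 yields exactly the n chunk starts
lemma pyRange_chunks (idx k : Int) (n : Nat) (hk : 0 < k) (hn : 0 < n) :
    PySem.List.pyRange idx (idx + (n : Int) * k) k
      = (List.range n).map (fun (j : Nat) => idx + (j : Int) * k) := by
  rw [PySem.List.pyRange_of_pos _ _ hk]
  have hlt : idx < idx + (n : Int) * k := by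
    have : 0 < (n : Int) * k := mul_pos (by exact_mod_cast hn) hk
    omega
  rw [if_pos hlt]
  have hdiv : (idx + (n : Int) * k - idx + k - 1) / k = (n : Int) := by
    have : idx + (n : Int) * k - idx + k - 1 = (k - 1) + k * (n : Int) := by ring
    rw [this, Int.add_mul_ediv_left _ _ (by omega),
      Int.ediv_eq_zero_of_lt (by omega) (by omega)]
    ring
  rw [hdiv]
  simp only [Int.toNat_natCast]
  apply List.map_congr_left; intro j _; ring

-- ===== VERDICT (by name: the statement is the Claim_ definition above) =====
theorem check_spec : Claim_equal_check := by
  intro s idx words _ hpre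
  unfold Spec_check
  obtain ⟨hne, hhd⟩ := hpre
  obtain ⟨w0, ws, rfl⟩ := List.exists_cons_of_ne_nil hne
  have hk : 0 < PySem.Str.len w0 := by
    rw [PySem.Str.len_eq]
    have hw0 : w0.toList ≠ [] := by simpa using hhd
    cases h : w0.toList with
    | nil => exact absurd h hw0
    | cons a l => simp
  rw [Bool.eq_iff_iff]
  unfold check check_alt
  simp only []
  set k := PySem.Str.len w0 with hkdef
  set n : Nat := (w0 :: ws).length with hndef
  have hrange : PySem.List.pyRange idx (idx + ((w0 :: ws).length : Int) * k) k
      = (List.range n).map (fun (j : Nat) => idx + (j : Int) * k) :=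
    pyRange_chunks idx k n hk (by simp [hndef])
  rw [hrange]
  set chunks := (List.range n).map
      (fun (j : Nat) => PySem.Str.slice s (some (idx + (j : Int) * k)) (some (idx + ((j : Int) + 1) * k)))
    with hchunks
  have hmap : ((List.range n).map (fun (j : Nat) => idx + (j : Int) * k)).map
      (fun i => PySem.Str.slice s (some i) (some (i + k))) = chunks := by
    rw [List.map_map, hchunks]
    exact List.map_congr_left (fun j _ => by
      have h1 : idx + (j : Int) * k + k = idx + ((j : Int) + 1) * k := by ring
      simp [Function.comp, h1])
  have hloop := checkA_loop_iff s k
    (((List.range n)).map (fun (j : Nat) => idx + (j : Int) * k))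
    ((w0 :: ws).foldl (fun d x => d.modify x 0 (· + 1))
      ((w0 :: ws).foldl (fun d x => d.insert x (0 : Int)) PySem.Dict.empty))
    (Multiset.ofList (w0 :: ws))
    (fun w => rep_init (w0 :: ws) w)
  rw [hmap] at hloop
  rw [hloop]
  have hcard : chunks.length = (w0 :: ws).length := by
    simp [hchunks, hndef]
  constructor
  · intro hle
    have heq : Multiset.ofList chunks = Multiset.ofList (w0 :: ws) := by
      refine Multiset.eq_of_le_of_card_le hle ?_
      simp [hcard]
    have hperm : chunks.Perm (w0 :: ws) := by
      exact Quotient.exact heq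
    simp [(PySem.List.sorted_id_eq_sorted_id_iff_perm chunks (w0 :: ws)).mpr hperm]
  · intro hb
    have hperm : chunks.Perm (w0 :: ws) :=
      (PySem.List.sorted_id_eq_sorted_id_iff_perm chunks (w0 :: ws)).mp (by simpa using hb)
    exact le_of_eq (Quotient.sound hperm)
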